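-- pv_equiv track=rewrite | github.com/harasees-singh/Competitive_Programming | Practice_Problems_codechef/color_me_yellow.py | no_of_columns
-- ===== SOURCE A (Python) =====
-- def no_of_columns(n, r, g, b):
--     a = min(n, r, b)
--     lo = 0
--     hi = a
--     ans = 0
--     while lo<=hi:
--         mid = lo + (hi-lo)//2
--         if 3*(mid-1) + 1 < (r + g + b):
--             ans = mid
--             lo = mid + 1
--         else:
--             hi = mid - 1
--     return ans
-- ===== SOURCE B (Python) =====
-- def no_of_columns(n, r, g, b):
--     # closed form: largest mid in [0, min(n,r,b)] with 3*(mid-1)+1 < r+g+b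
--     a = min(n, r, b)
--     return max(0, min(a, (r + g + b + 1) // 3))
-- ===== Notes on version B (the rewrite author's own statement) =====
-- stated objective: faster
-- what changed: Replaces the binary search over [0, min(n,r,b)] with a closed-form answer max(0, min(a, (r+g+b+1)//3)), derived from the monotone predicate 3*(mid-1)+1 < r+g+b.
import Mathlib
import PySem

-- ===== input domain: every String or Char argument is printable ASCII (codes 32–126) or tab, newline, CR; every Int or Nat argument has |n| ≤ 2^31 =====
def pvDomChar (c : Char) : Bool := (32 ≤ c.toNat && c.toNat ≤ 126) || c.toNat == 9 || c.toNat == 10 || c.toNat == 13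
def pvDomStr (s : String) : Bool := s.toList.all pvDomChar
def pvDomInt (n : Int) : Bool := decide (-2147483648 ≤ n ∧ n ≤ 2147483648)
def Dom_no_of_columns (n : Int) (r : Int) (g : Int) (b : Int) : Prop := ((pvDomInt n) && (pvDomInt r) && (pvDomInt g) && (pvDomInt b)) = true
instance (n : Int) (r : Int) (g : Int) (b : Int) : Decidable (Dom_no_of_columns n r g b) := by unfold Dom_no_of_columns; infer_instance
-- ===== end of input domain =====

-- B replaces A's binary search with the closed form max(0, min(min(n,r,b), (r+g+b+1)//3)) (asymptotically faster: O(1) vs O(log)).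


-- ===== PORT A =====
-- the while-loop of A; the fuel only makes the recursion structural (it never runs out before lo > hi)
def noColsLoop (s : Int) : Nat → Int → Int → Int → Int
  | 0, _, _, ans => ans
  | Nat.succ fuel, lo, hi, ans =>
    if lo ≤ hi then
      let mid := lo + PySem.Int.floordiv (hi - lo) 2
      if 3 * (mid - 1) + 1 < s then
        noColsLoop s fuel (mid + 1) hi mid
      else
        noColsLoop s fuel lo (mid - 1) ans
    else ans

def no_of_columns (n : Int) (r : Int) (g : Int) (b : Int) : Int :=
  let a := min (min n r) b
  noColsLoop (r + g + b) (a + 1).toNat 0 a 0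

-- ===== PORT B =====
def no_of_columns_alt (n : Int) (r : Int) (g : Int) (b : Int) : Int :=
  let a := min (min n r) b
  max 0 (min a (PySem.Int.floordiv (r + g + b + 1) 3))

-- ===== PRECONDITION & SPEC =====
def Spec_no_of_columns (n : Int) (r : Int) (g : Int) (b : Int) (out : Int) : Prop := out = no_of_columns_alt n r g b
instance (n : Int) (r : Int) (g : Int) (b : Int) (out : Int) : Decidable (Spec_no_of_columns n r g b out) := by unfold Spec_no_of_columns; infer_instance

-- ===== CLAIM (what is proved, stated in full; the proofs are below) =====
def Claim_equal_no_of_columns : Prop := ∀ (n : Int) (r : Int) (g : Int) (b : Int), Dom_no_of_columns n r g b → Spec_no_of_columns n r g b (no_of_columns n r g b)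

-- ===== LEMMAS AND PROOFS =====

-- f = (s+1)//3 is the threshold: the loop predicate 3*(m-1)+1 < s holds iff m <= f
lemma pred_iff_le_f (s m : Int) :
    (3 * (m - 1) + 1 < s) ↔ m ≤ PySem.Int.floordiv (s + 1) 3 := by
  rw [PySem.Int.le_floordiv_iff_mul_le (by omega : (0:Int) < 3)]
  omega

-- loop invariant: 0 ≤ lo ≤ hi+1, enough fuel, and ans = max 0 (min (lo-1) f); the loop returns max 0 (min hi f)
lemma noColsLoop_eq (s : Int) : ∀ (fuel : Nat) (lo hi ans : Int), (hi + 1 - lo).toNat ≤ fuel →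
    0 ≤ lo → lo ≤ hi + 1 →
    ans = max 0 (min (lo - 1) (PySem.Int.floordiv (s + 1) 3)) →
    noColsLoop s fuel lo hi ans = max 0 (min hi (PySem.Int.floordiv (s + 1) 3)) := by
  intro fuel
  induction fuel with
  | zero =>
    intro lo hi ans hk hlo0 hlohi hans
    simp only [noColsLoop]
    omega
  | succ fuel ih =>
    intro lo hi ans hk hlo0 hlohi hans
    set f := PySem.Int.floordiv (s + 1) 3 with hf
    simp only [noColsLoop]
    by_cases hle : lo ≤ hi
    · simp only [hle, if_pos]
      have hmid := PySem.Int.floordiv_two_mid_bounds (lo := 0) (hi := hi - lo) (by omega)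
      rw [zero_add] at hmid
      set mid := lo + PySem.Int.floordiv (hi - lo) 2 with hm
      by_cases hp : 3 * (mid - 1) + 1 < s
      · have hmf : mid ≤ f := (pred_iff_le_f s mid).mp hp
        simp only [hp, if_pos]
        exact ih (mid + 1) hi mid (by omega) (by omega) (by omega) (by omega)
      · have hmf : f < mid := by
          by_contra hcon
          exact hp ((pred_iff_le_f s mid).mpr (by omega))
        simp only [hp, if_neg, not_false_iff]
        rw [ih lo (mid - 1) ans (by omega) hlo0 (by omega) hans]
        omega
    · simp only [hle, if_neg, not_false_iff]
      omega

-- ===== VERDICT (by name: the statement is the Claim_ definition above) =====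
theorem no_of_columns_spec : Claim_equal_no_of_columns := by
  intro n r g b _hd
  unfold Spec_no_of_columns
  simp only [no_of_columns, no_of_columns_alt]
  set a := min (min n r) b with ha
  by_cases h0 : 0 ≤ a
  · exact noColsLoop_eq (r + g + b) (a + 1).toNat 0 a 0 (by omega) (by omega) (by omega) (by omega)
  · have hz : (a + 1).toNat = 0 := by omega
    rw [hz]
    simp only [noColsLoop]
    omega
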